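-- pv_equiv track=rewrite | github.com/Dimitrije-Jimmy/AdventOfCode2024 | day12/main.2.6.py | get_boundary_edges
-- ===== SOURCE A (Python) =====
-- def edge_normalized(e):
--     (x1, y1), (x2, y2) = e
--     if (x2 < x1) or (x2 == x1 and y2 < y1):
--         return ((x2, y2), (x1, y1))
--     else:
--         return ((x1, y1), (x2, y2))
--
-- def get_boundary_edges(region_positions, grid):
--     n = len(grid)
--     m = len(grid[0])
--     region_set = set(region_positions)
--     edges = set()
--
--     for (i, j) in region_positions:
--         # Top
--         if i == 0 or (i-1,j) not in region_set:
--             e = ((i, j), (i, j+1))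
--             edges.add(edge_normalized(e))
--         # Bottom
--         if i == n-1 or (i+1,j) not in region_set:
--             e = ((i+1, j), (i+1, j+1))
--             edges.add(edge_normalized(e))
--         # Left
--         if j == 0 or (i,j-1) not in region_set:
--             e = ((i, j), (i+1, j))
--             edges.add(edge_normalized(e))
--         # Right
--         if j == m-1 or (i,j+1) not in region_set:
--             e = ((i, j+1), (i+1, j+1))
--             edges.add(edge_normalized(e))
--
--     return edges
-- ===== SOURCE B (Python) =====
-- # Toggle-cancellation: every cell contributes its four unit edges; an edge shared
-- # by two region cells is toggled twice and cancels, leaving exactly the boundary.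
-- # The grid is not needed (region cells are assumed to lie inside the grid).
-- def get_boundary_edges(region_positions, grid):
--     edges = set()
--     for (i, j) in dict.fromkeys(region_positions):
--         for e in (((i, j), (i, j + 1)),
--                   ((i + 1, j), (i + 1, j + 1)),
--                   ((i, j), (i + 1, j)),
--                   ((i, j + 1), (i + 1, j + 1))):
--             if e in edges:
--                 edges.remove(e)
--             else:
--                 edges.add(e)
--     return edges
-- ===== Notes on version B (the rewrite author's own statement) =====
-- stated objective: simpler
-- what changed: Instead of testing grid borders and neighbor membership for each of a cell's four sides (plus normalizing each edge), B toggles each cell's four already-normalized unit edges in a set over the deduplicated region, so edges shared by two region cells cancel and only boundary edges remain; the grid is never consulted.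
-- intended difference: On regions containing both a grid-border cell and its out-of-grid mirror neighbour across that border (possible only for ill-formed, partly out-of-grid regions), A's border shortcuts (i==0/i==n-1/j==0/j==m-1) include the edge between those two region cells although it is interior to the region, while B returns only edges between region and non-region cells, the intended region boundary. — e.g. on get_boundary_edges([(0, 0), (-1, 0)], [[1]]): A returns [((0, 0), (0, 1)), ((1, 0), (1, 1)), ((0, 0), (1, 0)), ((0, 1), (1, 1)), ((-1, 0), (-1, 1)), ((-1, 0), (0, 0)), ((-1, 1…, B returns [((1, 0), (1, 1)), ((0, 0), (1, 0)), ((0, 1), (1, 1)), ((-1, 0), (-1, 1)), ((-1, 0), (0, 0)), ((-1, 1), (0, 1))]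
import Mathlib
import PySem

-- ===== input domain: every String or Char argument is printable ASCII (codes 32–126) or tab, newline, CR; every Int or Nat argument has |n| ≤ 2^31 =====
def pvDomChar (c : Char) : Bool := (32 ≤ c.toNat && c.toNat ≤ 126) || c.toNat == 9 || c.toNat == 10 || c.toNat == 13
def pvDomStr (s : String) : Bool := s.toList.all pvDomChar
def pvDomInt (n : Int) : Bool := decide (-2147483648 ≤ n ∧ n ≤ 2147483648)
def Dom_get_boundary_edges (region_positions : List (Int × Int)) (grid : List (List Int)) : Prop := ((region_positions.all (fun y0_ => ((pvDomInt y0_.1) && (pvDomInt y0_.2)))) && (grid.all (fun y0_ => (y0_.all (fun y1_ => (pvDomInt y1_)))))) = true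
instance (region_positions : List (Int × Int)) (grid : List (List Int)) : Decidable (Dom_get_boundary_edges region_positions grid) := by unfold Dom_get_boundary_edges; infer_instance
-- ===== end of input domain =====

-- B replaces A's border/neighbor tests and edge normalization by toggling each region cell's
-- four unit edges in a set (shared edges cancel), ignoring the grid: a simpler, shorter algorithm.


-- ===== PORT A =====
def edge_normalized (e : (Int × Int) × (Int × Int)) : (Int × Int) × (Int × Int) :=
  let x1 := e.1.1; let y1 := e.1.2; let x2 := e.2.1; let y2 := e.2.2
  if x2 < x1 ∨ (x2 = x1 ∧ y2 < y1) then ((x2, y2), (x1, y1)) else ((x1, y1), (x2, y2))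

def get_boundary_edges (region_positions : List (Int × Int)) (grid : List (List Int)) : List ((Int × Int) × (Int × Int)) :=
  let n : Int := grid.length
  let m : Int := ((PySem.List.pyGet? grid 0).getD []).length  -- len(grid[0]); IndexError on grid = [] is excluded by Pre_
  let region_set : PySem.Set (Int × Int) := PySem.Set.ofList region_positions
  region_positions.foldl (fun (edges : PySem.Set ((Int × Int) × (Int × Int))) c =>
    let i := c.1; let j := c.2
    let edges := if i = 0 ∨ (i - 1, j) ∉ region_set then PySem.Set.add edges (edge_normalized ((i, j), (i, j + 1))) else edges
    let edges := if i = n - 1 ∨ (i + 1, j) ∉ region_set then PySem.Set.add edges (edge_normalized ((i + 1, j), (i + 1, j + 1))) else edges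
    let edges := if j = 0 ∨ (i, j - 1) ∉ region_set then PySem.Set.add edges (edge_normalized ((i, j), (i + 1, j))) else edges
    let edges := if j = m - 1 ∨ (i, j + 1) ∉ region_set then PySem.Set.add edges (edge_normalized ((i, j + 1), (i + 1, j + 1))) else edges
    edges) PySem.Set.empty

-- ===== PORT B =====
def get_boundary_edges_alt (region_positions : List (Int × Int)) (grid : List (List Int)) : List ((Int × Int) × (Int × Int)) :=
  (PySem.List.dedup region_positions).foldl (fun edges c =>
    let i := c.1; let j := c.2
    [((i, j), (i, j + 1)), ((i + 1, j), (i + 1, j + 1)),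
     ((i, j), (i + 1, j)), ((i, j + 1), (i + 1, j + 1))].foldl
      (fun (edges : PySem.Set ((Int × Int) × (Int × Int))) e =>
        if e ∈ edges then edges.erase e  -- set.remove of an element known to be present
        else PySem.Set.add edges e)
      edges) PySem.Set.empty

-- ===== PRECONDITION & SPEC =====
-- Pre_ excludes only the empty grid, on which A raises IndexError at len(grid[0]).
def Pre_get_boundary_edges (region_positions : List (Int × Int)) (grid : List (List Int)) : Prop :=
  grid ≠ []
instance (region_positions : List (Int × Int)) (grid : List (List Int)) : Decidable (Pre_get_boundary_edges region_positions grid) := by unfold Pre_get_boundary_edges; infer_instance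

def pvWitness_get_boundary_edges : (List (Int × Int)) × List (List Int) := ([(0, 0), (0, 1)], [[1, 2]])

-- On regions that contain both a grid-border cell and its out-of-grid mirror neighbour across
-- that border, A's border shortcuts (i==0, i==n-1, j==0, j==m-1) return the edge between those
-- two region cells although it is interior to the region; B returns only the edges between
-- region and non-region cells, which is the intended boundary.
def D_get_boundary_edges (region_positions : List (Int × Int)) (grid : List (List Int)) : Prop :=
  ∃ c ∈ region_positions,
    ((c.1 + 1, c.2) ∈ region_positions ∧ (c.1 = -1 ∨ c.1 = (grid.length : Int) - 1)) ∨
    ((c.1, c.2 + 1) ∈ region_positions ∧ (c.2 = -1 ∨ c.2 = ((grid.headD []).length : Int) - 1))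
instance (region_positions : List (Int × Int)) (grid : List (List Int)) : Decidable (D_get_boundary_edges region_positions grid) := by unfold D_get_boundary_edges; infer_instance

def Spec_get_boundary_edges (region_positions : List (Int × Int)) (grid : List (List Int)) (out : List ((Int × Int) × (Int × Int))) : Prop := ¬ D_get_boundary_edges region_positions grid → out = get_boundary_edges_alt region_positions grid
instance (region_positions : List (Int × Int)) (grid : List (List Int)) (out : List ((Int × Int) × (Int × Int))) : Decidable (Spec_get_boundary_edges region_positions grid out) := by unfold Spec_get_boundary_edges; infer_instance

def pvDiffWitness_get_boundary_edges : (List (Int × Int)) × List (List Int) := ([(0, 0), (-1, 0)], [[1]])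
def pvDiffWitnessOut_get_boundary_edges : (List ((Int × Int) × (Int × Int))) × (List ((Int × Int) × (Int × Int))) :=
  ([((0, 0), (0, 1)), ((1, 0), (1, 1)), ((0, 0), (1, 0)), ((0, 1), (1, 1)),
    ((-1, 0), (-1, 1)), ((-1, 0), (0, 0)), ((-1, 1), (0, 1))],
   [((1, 0), (1, 1)), ((0, 0), (1, 0)), ((0, 1), (1, 1)),
    ((-1, 0), (-1, 1)), ((-1, 0), (0, 0)), ((-1, 1), (0, 1))])

-- ===== CLAIM (what is proved, stated in full; the proofs are below) =====
def Claim_unchanged_get_boundary_edges : Prop := ∀ (region_positions : List (Int × Int)) (grid : List (List Int)), Dom_get_boundary_edges region_positions grid → Pre_get_boundary_edges region_positions grid → Spec_get_boundary_edges region_positions grid (get_boundary_edges region_positions grid)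
def Claim_changed_get_boundary_edges : Prop := Dom_get_boundary_edges (pvDiffWitness_get_boundary_edges.1) (pvDiffWitness_get_boundary_edges.2) ∧ Pre_get_boundary_edges (pvDiffWitness_get_boundary_edges.1) (pvDiffWitness_get_boundary_edges.2) ∧ D_get_boundary_edges (pvDiffWitness_get_boundary_edges.1) (pvDiffWitness_get_boundary_edges.2) ∧ get_boundary_edges (pvDiffWitness_get_boundary_edges.1) (pvDiffWitness_get_boundary_edges.2) = pvDiffWitnessOut_get_boundary_edges.1 ∧ get_boundary_edges_alt (pvDiffWitness_get_boundary_edges.1) (pvDiffWitness_get_boundary_edges.2) = pvDiffWitnessOut_get_boundary_edges.2 ∧ pvDiffWitnessOut_get_boundary_edges.1 ≠ pvDiffWitnessOut_get_boundary_edges.2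
def Claim_exact_get_boundary_edges : Prop := ∀ (region_positions : List (Int × Int)) (grid : List (List Int)), Dom_get_boundary_edges region_positions grid → Pre_get_boundary_edges region_positions grid → D_get_boundary_edges region_positions grid → get_boundary_edges region_positions grid ≠ get_boundary_edges_alt region_positions grid

-- ===== LEMMAS AND PROOFS =====

abbrev PvE := (Int × Int) × (Int × Int)

-- the four (edge, opposite-neighbour) pairs of a cell, in A's and B's common emission order
def pvQuads (c : Int × Int) : List (PvE × (Int × Int)) :=
  [(((c.1, c.2), (c.1, c.2 + 1)), (c.1 - 1, c.2)),
   (((c.1 + 1, c.2), (c.1 + 1, c.2 + 1)), (c.1 + 1, c.2)),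
   (((c.1, c.2), (c.1 + 1, c.2)), (c.1, c.2 - 1)),
   (((c.1, c.2 + 1), (c.1 + 1, c.2 + 1)), (c.1, c.2 + 1))]

def pvEdges (c : Int × Int) : List PvE := (pvQuads c).map Prod.fst

-- the two cells capable of emitting a (well-formed) edge
def pvG1 (e : PvE) : Int × Int := e.1
def pvG2 (e : PvE) : Int × Int := if e.2.1 = e.1.1 then (e.1.1 - 1, e.1.2) else (e.1.1, e.1.2 - 1)

-- an edge is a boundary edge iff exactly one of its two cells lies in the region
def pvBnd (rp : List (Int × Int)) (e : PvE) : Bool := decide (pvG1 e ∈ rp) != decide (pvG2 e ∈ rp)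

def pvKeep (rp : List (Int × Int)) (c : Int × Int) : List PvE :=
  ((pvQuads c).filter (fun q => decide (q.2 ∉ rp))).map Prod.fst

def pvToggle (s : PySem.Set PvE) (e : PvE) : PySem.Set PvE :=
  if e ∈ s then s.erase e else PySem.Set.add s e

def pvAStep (rp : List (Int × Int)) (n m : Int) (edges : PySem.Set PvE) (c : Int × Int) : PySem.Set PvE :=
  let i := c.1; let j := c.2
  let edges := if i = 0 ∨ (i - 1, j) ∉ PySem.Set.ofList rp then PySem.Set.add edges (edge_normalized ((i, j), (i, j + 1))) else edges
  let edges := if i = n - 1 ∨ (i + 1, j) ∉ PySem.Set.ofList rp then PySem.Set.add edges (edge_normalized ((i + 1, j), (i + 1, j + 1))) else edges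
  let edges := if j = 0 ∨ (i, j - 1) ∉ PySem.Set.ofList rp then PySem.Set.add edges (edge_normalized ((i, j), (i + 1, j))) else edges
  let edges := if j = m - 1 ∨ (i, j + 1) ∉ PySem.Set.ofList rp then PySem.Set.add edges (edge_normalized ((i, j + 1), (i + 1, j + 1))) else edges
  edges

lemma pvA_eq (rp : List (Int × Int)) (grid : List (List Int)) :
    get_boundary_edges rp grid =
      rp.foldl (pvAStep rp grid.length (((PySem.List.pyGet? grid 0).getD []).length)) PySem.Set.empty := rfl

lemma pvB_eq (rp : List (Int × Int)) (grid : List (List Int)) :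
    get_boundary_edges_alt rp grid =
      (PySem.List.dedup rp).foldl (fun s c => (pvEdges c).foldl pvToggle s) PySem.Set.empty := rfl

lemma pvFoldFlat (l : List (Int × Int)) (s : PySem.Set PvE) :
    l.foldl (fun s c => (pvEdges c).foldl pvToggle s) s = (l.flatMap pvEdges).foldl pvToggle s := by
  induction l generalizing s with
  | nil => rfl
  | cons c l ih => simp [List.flatMap_cons, List.foldl_append, ih]

lemma pvEdges_nodup (c : Int × Int) : (pvEdges c).Nodup := by
  simp [pvEdges, pvQuads, Prod.ext_iff]


lemma pvG_ne (e : PvE) : pvG1 e ≠ pvG2 e := by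
  unfold pvG1 pvG2
  split <;> (intro h; rw [Prod.ext_iff] at h; omega)

lemma pvMemEdges {e : PvE} {c₀ : Int × Int} (h : e ∈ pvEdges c₀) (c : Int × Int) :
    e ∈ pvEdges c ↔ (c = pvG1 e ∨ c = pvG2 e) := by
  simp only [pvEdges, pvQuads, List.map_cons, List.map_nil, List.mem_cons, List.not_mem_nil, or_false] at h
  rcases h with rfl | rfl | rfl | rfl <;>
    (simp only [pvG1, pvG2]; simp [pvEdges, pvQuads, Prod.ext_iff]) <;>
    omega

lemma pvGen {q : PvE × (Int × Int)} {c : Int × Int} (h : q ∈ pvQuads c) :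
    (pvG1 q.1 = c ∧ pvG2 q.1 = q.2) ∨ (pvG1 q.1 = q.2 ∧ pvG2 q.1 = c) := by
  simp only [pvQuads, List.mem_cons, List.not_mem_nil, or_false] at h
  rcases h with rfl | rfl | rfl | rfl <;>
    simp [pvG1, pvG2, Prod.ext_iff]

lemma pvFilterErase (p : PvE → Bool) (e : PvE) (hp : p e = false) :
    ∀ l : List PvE, (l.erase e).filter p = l.filter p := by
  intro l
  induction l with
  | nil => rfl
  | cons a l ih =>
    by_cases hae : a = e
    · subst hae
      rw [List.erase_cons_head]
      simp [List.filter_cons, hp]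
    · rw [List.erase_cons_tail (by simp [hae])]
      simp [List.filter_cons, ih]

-- templates to fill
lemma pvMain (rp : List (Int × Int)) :
    ∀ (R T : List PvE) (s : List PvE),
      (∀ e ∈ T ++ R, (T ++ R).count e = if pvBnd rp e then 1 else 2) →
      s.Nodup →
      s.filter (pvBnd rp) = T.filter (pvBnd rp) →
      (∀ e, e ∈ s ↔ T.count e % 2 = 1) →
      (R.foldl pvToggle s).Nodup ∧
      (R.foldl pvToggle s).filter (pvBnd rp) = (T ++ R).filter (pvBnd rp) ∧
      (∀ e, e ∈ R.foldl pvToggle s ↔ (T ++ R).count e % 2 = 1) := by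
  intro R
  induction R with
  | nil =>
    intro T s _ ha hc hd
    refine ⟨ha, by simpa using hc, by simpa using hd⟩
  | cons e₀ R ih =>
    intro T s hF ha hc hd
    have hassoc : (T ++ [e₀]) ++ R = T ++ e₀ :: R := by simp
    simp only [List.foldl_cons]
    by_cases hmem : e₀ ∈ s
    · -- e₀ is toggled off: it was opened by its first occurrence, so it is interior
      have hodd : T.count e₀ % 2 = 1 := (hd e₀).1 hmem
      have hbnd : pvBnd rp e₀ = false := by
        by_contra hb
        have hb' : pvBnd rp e₀ = true := by simpa using hb
        have h1 : (T ++ e₀ :: R).count e₀ = 1 := by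
          have := hF e₀ (by simp); rw [hb'] at this; simpa using this
        have h2 : (T ++ e₀ :: R).count e₀ = T.count e₀ + (e₀ :: R).count e₀ := List.count_append ..
        have h3 : (e₀ :: R).count e₀ = R.count e₀ + 1 := List.count_cons_self ..
        omega
      have hstep : pvToggle s e₀ = s.erase e₀ := by simp [pvToggle, hmem]
      rw [hstep, ← hassoc]
      apply ih
      · intro e he; rw [hassoc]; exact hF e (by rw [← hassoc]; exact he)
      · exact ha.erase e₀
      · rw [pvFilterErase _ _ hbnd s, hc]
        simp [hbnd]
      · intro e
        by_cases heq : e = e₀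
        · subst heq
          simp [ha.not_mem_erase, List.count_append]
          omega
        · have hne : ¬ e₀ = e := fun h => heq h.symm
          rw [List.mem_erase_of_ne heq, hd e]
          simp [List.count_append, List.count_singleton, hne]
    · -- e₀ is toggled on
      have heven : ¬ (T.count e₀ % 2 = 1) := fun h => hmem ((hd e₀).2 h)
      have hstep : pvToggle s e₀ = s ++ [e₀] := by
        simp [pvToggle, hmem, PySem.Set.add_of_not_mem hmem]
      rw [hstep, ← hassoc]
      apply ih
      · intro e he; rw [hassoc]; exact hF e (by rw [← hassoc]; exact he)
      · rw [List.nodup_append]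
        refine ⟨ha, List.nodup_singleton _, ?_⟩
        intro x hx y hy
        rw [List.mem_singleton] at hy
        subst hy
        exact fun h => hmem (h ▸ hx)
      · simp [List.filter_append, hc]
      · intro e
        by_cases heq : e = e₀
        · subst heq
          simp [List.count_append]
          omega
        · have hne : ¬ e₀ = e := fun h => heq h.symm
          simp [List.count_append, List.count_singleton, heq, hne, hd e]

lemma pvCountFlat (l : List (Int × Int)) (e : PvE) :
    (l.flatMap pvEdges).count e = (l.map (fun c => (pvEdges c).count e)).sum := by
  induction l with
  | nil => rfl
  | cons c l ih => simp [List.flatMap_cons, List.count_append, ih]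

lemma pvCountEdges {e : PvE} {c₀ : Int × Int} (h : e ∈ pvEdges c₀) (c : Int × Int) :
    (pvEdges c).count e = if c = pvG1 e ∨ c = pvG2 e then 1 else 0 := by
  by_cases hm : e ∈ pvEdges c
  · rw [if_pos ((pvMemEdges h c).1 hm)]
    exact List.count_eq_one_of_mem (pvEdges_nodup c) hm
  · rw [if_neg (fun hc => hm ((pvMemEdges h c).2 hc)), List.count_eq_zero_of_not_mem hm]

lemma pvIndSum (a b : Int × Int) (hab : a ≠ b) :
    ∀ l : List (Int × Int),
      (l.map (fun c => if c = a ∨ c = b then (1 : Nat) else 0)).sum = l.count a + l.count b := by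
  intro l
  induction l with
  | nil => rfl
  | cons c l ih =>
    by_cases h1 : c = a <;> by_cases h2 : c = b
    · exact absurd (h1.symm.trans h2) hab
    all_goals simp [List.count_cons, h1, h2, ih, hab, Ne.symm hab]
    all_goals omega

lemma pvHcnt (rp : List (Int × Int)) :
    ∀ e ∈ (PySem.List.dedup rp).flatMap pvEdges,
      ((PySem.List.dedup rp).flatMap pvEdges).count e = if pvBnd rp e then 1 else 2 := by
  intro e he
  obtain ⟨c₀, hc₀, he₀⟩ := List.mem_flatMap.1 he
  have hC : (PySem.List.dedup rp).Nodup := by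
    simp [PySem.List.dedup_eq_ofList, PySem.Set.nodup_ofList]
  have hmemC : ∀ x : Int × Int, x ∈ PySem.List.dedup rp ↔ x ∈ rp := by
    intro x; simp [PySem.List.dedup_eq_ofList, PySem.Set.mem_ofList]
  rw [pvCountFlat,
      List.map_congr_left (fun c _ => pvCountEdges he₀ c),
      pvIndSum _ _ (pvG_ne e)]
  have hcnt1 : ∀ x : Int × Int, (PySem.List.dedup rp).count x = if x ∈ rp then 1 else 0 := by
    intro x
    by_cases hx : x ∈ rp
    · rw [if_pos hx, List.count_eq_one_of_mem hC ((hmemC x).2 hx)]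
    · rw [if_neg hx, List.count_eq_zero_of_not_mem (fun h => hx ((hmemC x).1 h))]
  rw [hcnt1, hcnt1]
  have hc₀rp : c₀ ∈ rp := (hmemC c₀).1 hc₀
  have hor : c₀ = pvG1 e ∨ c₀ = pvG2 e := (pvMemEdges he₀ c₀).1 he₀
  unfold pvBnd
  rcases hor with rfl | rfl
  · by_cases h2 : pvG2 e ∈ rp <;> simp [hc₀rp, h2]
  · by_cases h1 : pvG1 e ∈ rp <;> simp [hc₀rp, h1]

lemma pvNormH (i j : Int) : edge_normalized ((i, j), (i, j + 1)) = ((i, j), (i, j + 1)) := by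
  simp only [edge_normalized]
  rw [if_neg (by omega)]

lemma pvNormV (i j : Int) : edge_normalized ((i, j), (i + 1, j)) = ((i, j), (i + 1, j)) := by
  simp only [edge_normalized]
  rw [if_neg (by omega)]

def pvKeepF (rp : List (Int × Int)) (n m : Int) (c : Int × Int) : List PvE :=
  (if c.1 = 0 ∨ (c.1 - 1, c.2) ∉ rp then [((c.1, c.2), (c.1, c.2 + 1))] else []) ++
  (if c.1 = n - 1 ∨ (c.1 + 1, c.2) ∉ rp then [((c.1 + 1, c.2), (c.1 + 1, c.2 + 1))] else []) ++
  (if c.2 = 0 ∨ (c.1, c.2 - 1) ∉ rp then [((c.1, c.2), (c.1 + 1, c.2))] else []) ++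
  (if c.2 = m - 1 ∨ (c.1, c.2 + 1) ∉ rp then [((c.1, c.2 + 1), (c.1 + 1, c.2 + 1))] else [])

lemma pvAStepF (rp : List (Int × Int)) (n m : Int) (s : PySem.Set PvE) (c : Int × Int) :
    pvAStep rp n m s c = PySem.Set.update s (pvKeepF rp n m c) := by
  obtain ⟨i, j⟩ := c
  simp only [pvAStep, pvKeepF, PySem.Set.mem_ofList, pvNormH, pvNormV]
  by_cases c1 : i = 0 ∨ (i - 1, j) ∉ rp <;> by_cases c2 : i = n - 1 ∨ (i + 1, j) ∉ rp <;>
    by_cases c3 : j = 0 ∨ (i, j - 1) ∉ rp <;> by_cases c4 : j = m - 1 ∨ (i, j + 1) ∉ rp <;>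
    simp [c1, c2, c3, c4, PySem.Set.update_append, PySem.Set.update_cons, PySem.Set.update_nil]

lemma pvKeepF_eq (rp : List (Int × Int)) (n m : Int) {c : Int × Int}
    (hbc : (c.1 = 0 → (c.1 - 1, c.2) ∉ rp) ∧ (c.1 = n - 1 → (c.1 + 1, c.2) ∉ rp) ∧
           (c.2 = 0 → (c.1, c.2 - 1) ∉ rp) ∧ (c.2 = m - 1 → (c.1, c.2 + 1) ∉ rp)) :
    pvKeepF rp n m c = pvKeep rp c := by
  obtain ⟨i, j⟩ := c
  obtain ⟨k1, k2, k3, k4⟩ := hbc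
  have h1 : (i = 0 ∨ (i - 1, j) ∉ rp) ↔ (i - 1, j) ∉ rp := ⟨fun h => h.elim k1 id, Or.inr⟩
  have h2 : (i = n - 1 ∨ (i + 1, j) ∉ rp) ↔ (i + 1, j) ∉ rp := ⟨fun h => h.elim k2 id, Or.inr⟩
  have h3 : (j = 0 ∨ (i, j - 1) ∉ rp) ↔ (i, j - 1) ∉ rp := ⟨fun h => h.elim k3 id, Or.inr⟩
  have h4 : (j = m - 1 ∨ (i, j + 1) ∉ rp) ↔ (i, j + 1) ∉ rp := ⟨fun h => h.elim k4 id, Or.inr⟩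
  simp only [pvKeepF, pvKeep, pvQuads, h1, h2, h3, h4]
  by_cases m1 : (i - 1, j) ∈ rp <;> by_cases m2 : (i + 1, j) ∈ rp <;>
    by_cases m3 : (i, j - 1) ∈ rp <;> by_cases m4 : (i, j + 1) ∈ rp <;>
    simp [m1, m2, m3, m4]

lemma pvAFold (rp : List (Int × Int)) (n m : Int) :
    ∀ (l : List (Int × Int)) (s : PySem.Set PvE),
      l.foldl (pvAStep rp n m) s = PySem.Set.update s (l.flatMap (pvKeepF rp n m)) := by
  intro l
  induction l with
  | nil => intro s; simp [PySem.Set.update_nil]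
  | cons c l ih =>
    intro s
    rw [List.foldl_cons, pvAStepF, ih, List.flatMap_cons, PySem.Set.update_append]

lemma pvA_ofList (rp : List (Int × Int)) (grid : List (List Int)) :
    get_boundary_edges rp grid =
      PySem.Set.ofList (rp.flatMap
        (pvKeepF rp grid.length (((PySem.List.pyGet? grid 0).getD []).length))) := by
  rw [pvA_eq]
  simp only [PySem.Set.empty]
  rw [pvAFold, PySem.Set.update_nil_left]

lemma pvUpdateSubset (s : PySem.Set PvE) (xs : List PvE) (h : ∀ x ∈ xs, x ∈ s) :
    PySem.Set.update s xs = s := by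
  rw [PySem.Set.update_eq_append_filter]
  have hnil : (PySem.Set.ofList xs).filter (fun y => !(PySem.Set.contains s y)) = [] := by
    rw [List.filter_eq_nil_iff]
    intro a ha
    have := h a ((PySem.Set.mem_ofList _ _).1 ha)
    simp [PySem.Set.contains_iff, this]
  rw [hnil, List.append_nil]

lemma pvDedupFlat (rp : List (Int × Int)) :
    ∀ l : List (Int × Int),
      PySem.Set.ofList (l.flatMap (pvKeep rp)) =
        PySem.Set.ofList ((PySem.List.dedup l).flatMap (pvKeep rp)) := by
  intro l
  induction l using List.reverseRecOn with
  | nil => rfl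
  | append_singleton l c ih =>
    have hLHS : PySem.Set.ofList ((l ++ [c]).flatMap (pvKeep rp)) =
        PySem.Set.update (PySem.Set.ofList (l.flatMap (pvKeep rp))) (pvKeep rp c) := by
      rw [List.flatMap_append, PySem.Set.ofList_append, List.flatMap_singleton]
    by_cases hc : c ∈ l
    · rw [hLHS, ih]
      have hded : PySem.List.dedup (l ++ [c]) = PySem.List.dedup l := by
        rw [PySem.List.dedup_eq_ofList, PySem.List.dedup_eq_ofList,
            PySem.Set.ofList_append_singleton]
        exact PySem.Set.add_of_mem ((PySem.Set.mem_ofList _ _).2 hc)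
      rw [hded]
      apply pvUpdateSubset
      intro x hx
      rw [PySem.Set.mem_ofList]
      exact List.mem_flatMap.2 ⟨c, by
        rw [PySem.List.dedup_eq_ofList]
        exact (PySem.Set.mem_ofList _ _).2 hc, hx⟩
    · have hded : PySem.List.dedup (l ++ [c]) = PySem.List.dedup l ++ [c] := by
        rw [PySem.List.dedup_eq_ofList, PySem.List.dedup_eq_ofList,
            PySem.Set.ofList_append_singleton]
        exact PySem.Set.add_of_not_mem (fun h => hc ((PySem.Set.mem_ofList _ _).1 h))
      rw [hLHS, ih, hded, List.flatMap_append, PySem.Set.ofList_append, List.flatMap_singleton]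

lemma pvKeepBnd (rp : List (Int × Int)) {c : Int × Int} (hc : c ∈ rp) :
    pvKeep rp c = (pvEdges c).filter (pvBnd rp) := by
  unfold pvKeep pvEdges
  rw [List.filter_map]
  congr 1
  apply List.filter_congr
  intro q hq
  rcases pvGen hq with ⟨hg1, hg2⟩ | ⟨hg1, hg2⟩ <;>
    (simp only [Function.comp, pvBnd, hg1, hg2]
     by_cases hv : q.2 ∈ rp <;> simp [hv, hc])

lemma pvFilterFlat (p : PvE → Bool) :
    ∀ l : List (Int × Int),
      (l.flatMap pvEdges).filter p = l.flatMap (fun c => (pvEdges c).filter p) := by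
  intro l
  induction l with
  | nil => rfl
  | cons c l ih => simp [List.flatMap_cons, List.filter_append, ih]

lemma pvHead (grid : List (List Int)) :
    ((grid.headD []).length : Int) = (((PySem.List.pyGet? grid 0).getD []).length : Int) := by
  cases grid <;> simp [PySem.List.pyGet?, PySem.List.pyIdx?]

lemma pvNotMemB (rp : List (Int × Int)) (grid : List (List Int)) {e : PvE}
    (hg1 : pvG1 e ∈ rp) (hg2 : pvG2 e ∈ rp)
    (hshape : ∃ c₀ ∈ PySem.List.dedup rp, e ∈ pvEdges c₀) :
    e ∉ get_boundary_edges_alt rp grid := by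
  obtain ⟨-, -, hmem⟩ :=
    pvMain rp ((PySem.List.dedup rp).flatMap pvEdges) [] []
      (by simpa using pvHcnt rp) List.nodup_nil rfl (by simp)
  rw [pvB_eq, pvFoldFlat]
  simp only [PySem.Set.empty]
  intro hin
  have hodd : ((PySem.List.dedup rp).flatMap pvEdges).count e % 2 = 1 := by
    simpa using (hmem e).1 hin
  have hc := pvHcnt rp e (List.mem_flatMap.2 hshape)
  rw [if_neg (by simp [pvBnd, hg1, hg2])] at hc
  omega

lemma pvMemA (rp : List (Int × Int)) (grid : List (List Int)) {e : PvE} {c : Int × Int}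
    (hc : c ∈ rp)
    (hk : e ∈ pvKeepF rp grid.length (((PySem.List.pyGet? grid 0).getD []).length) c) :
    e ∈ get_boundary_edges rp grid := by
  rw [pvA_ofList]
  exact (PySem.Set.mem_ofList _ _).2 (List.mem_flatMap.2 ⟨c, hc, hk⟩)

lemma pvMemDedup (rp : List (Int × Int)) {c : Int × Int} (hc : c ∈ rp) :
    c ∈ PySem.List.dedup rp := by
  rw [PySem.List.dedup_eq_ofList]
  exact (PySem.Set.mem_ofList _ _).2 hc

-- ===== VERDICT (by name: the statement is the Claim_ definition above) =====
theorem get_boundary_edges_spec : Claim_unchanged_get_boundary_edges := by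
  intro rp grid _ _
  unfold Spec_get_boundary_edges
  intro hD
  -- outside D_, A's border shortcuts never fire together with a present neighbour
  have hbc : ∀ c ∈ rp,
      (c.1 = 0 → (c.1 - 1, c.2) ∉ rp) ∧
      (c.1 = (grid.length : Int) - 1 → (c.1 + 1, c.2) ∉ rp) ∧
      (c.2 = 0 → (c.1, c.2 - 1) ∉ rp) ∧
      (c.2 = (((PySem.List.pyGet? grid 0).getD []).length : Int) - 1 → (c.1, c.2 + 1) ∉ rp) := by
    intro c hc
    refine ⟨?_, ?_, ?_, ?_⟩
    · intro h0 hm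
      have e1 : c.1 - 1 + 1 = c.1 := by omega
      exact hD ⟨(c.1 - 1, c.2), hm, Or.inl ⟨by simpa [e1] using hc, Or.inl (by omega)⟩⟩
    · intro h0 hm
      exact hD ⟨c, hc, Or.inl ⟨hm, Or.inr h0⟩⟩
    · intro h0 hm
      have e1 : c.2 - 1 + 1 = c.2 := by omega
      exact hD ⟨(c.1, c.2 - 1), hm, Or.inr ⟨by simpa [e1] using hc, Or.inl (by omega)⟩⟩
    · intro h0 hm
      exact hD ⟨c, hc, Or.inr ⟨hm, Or.inr (by rw [pvHead]; exact h0)⟩⟩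
  -- B side: the toggle fold over the flattened edge stream keeps exactly the boundary edges
  obtain ⟨hnd, hfil, hmem⟩ :=
    pvMain rp ((PySem.List.dedup rp).flatMap pvEdges) [] []
      (by simpa using pvHcnt rp) List.nodup_nil rfl (by simp)
  have hall : ∀ e ∈ ((PySem.List.dedup rp).flatMap pvEdges).foldl pvToggle [],
      pvBnd rp e = true := by
    intro e he
    have hodd : ((PySem.List.dedup rp).flatMap pvEdges).count e % 2 = 1 := by
      simpa using (hmem e).1 he
    have heF : e ∈ (PySem.List.dedup rp).flatMap pvEdges := List.count_pos_iff.1 (by omega)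
    have := pvHcnt rp e heF
    by_contra hb'
    rw [if_neg (by simpa using hb')] at this
    omega
  have hBeq : ((PySem.List.dedup rp).flatMap pvEdges).foldl pvToggle [] =
      ((PySem.List.dedup rp).flatMap pvEdges).filter (pvBnd rp) :=
    (List.filter_eq_self.2 hall).symm.trans (by simpa using hfil)
  -- A side
  have hfk : ∀ l : List (Int × Int), (∀ c ∈ l, c ∈ rp) →
      l.flatMap (pvKeepF rp grid.length (((PySem.List.pyGet? grid 0).getD []).length)) =
      l.flatMap (pvKeep rp) := by
    intro l
    induction l with
    | nil => intro _; rfl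
    | cons c l ih =>
      intro hl
      rw [List.flatMap_cons, List.flatMap_cons, pvKeepF_eq rp _ _ (hbc c (hl c (by simp))),
          ih (fun x hx => hl x (by simp [hx]))]
  have hfm : ∀ l : List (Int × Int), (∀ c ∈ l, c ∈ rp) →
      l.flatMap (pvKeep rp) = l.flatMap (fun c => (pvEdges c).filter (pvBnd rp)) := by
    intro l
    induction l with
    | nil => intro _; rfl
    | cons c l ih =>
      intro hl
      rw [List.flatMap_cons, List.flatMap_cons, pvKeepBnd rp (hl c (by simp)),
          ih (fun x hx => hl x (by simp [hx]))]
  have hmemD : ∀ x : Int × Int, x ∈ PySem.List.dedup rp ↔ x ∈ rp := by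
    intro x; simp [PySem.List.dedup_eq_ofList, PySem.Set.mem_ofList]
  rw [pvA_ofList, pvB_eq, pvFoldFlat]
  simp only [PySem.Set.empty]
  rw [hBeq, hfk rp (fun c hc => hc), pvDedupFlat rp rp,
      hfm _ (fun c hc => (hmemD c).1 hc), ← pvFilterFlat]
  have hnd' : (((PySem.List.dedup rp).flatMap pvEdges).filter (pvBnd rp)).Nodup := by
    rw [← hBeq]; exact hnd
  exact PySem.Set.ofList_eq_self_of_nodup _ hnd'

theorem get_boundary_edges_changed : Claim_changed_get_boundary_edges := by
  unfold Claim_changed_get_boundary_edges; decide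

theorem get_boundary_edges_tight : Claim_exact_get_boundary_edges := by
  intro rp grid _ _ hD hEq
  obtain ⟨⟨i, j⟩, hcm, hcase⟩ := hD
  rcases hcase with ⟨hv, h0 | h0⟩ | ⟨hv, h0 | h0⟩
  · -- (i,j) and (i+1,j) in the region with row i+1 = 0: A keeps their shared edge (top shortcut)
    have heA : ((i + 1, j), (i + 1, j + 1)) ∈ get_boundary_edges rp grid := by
      refine pvMemA rp grid hv ?_
      exact List.mem_append_left _ (List.mem_append_left _ (List.mem_append_left _
        (by rw [if_pos (Or.inl (by omega : (i + 1 : Int) = 0))]; simp)))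
    have heB : ((i + 1, j), (i + 1, j + 1)) ∉ get_boundary_edges_alt rp grid := by
      refine pvNotMemB rp grid (by simpa [pvG1] using hv) ?_
        ⟨(i + 1, j), pvMemDedup rp hv, by simp [pvEdges, pvQuads]⟩
      have harith : ((i + 1 - 1 : Int), j) = (i, j) := by rw [Prod.mk.injEq]; omega
      simpa [pvG2, harith] using hcm
    rw [hEq] at heA
    exact heB heA
  · -- (i,j) and (i+1,j) in the region with i = n-1: A keeps their shared edge (bottom shortcut)
    have heA : ((i + 1, j), (i + 1, j + 1)) ∈ get_boundary_edges rp grid := by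
      refine pvMemA rp grid hcm ?_
      refine List.mem_append_left _ (List.mem_append_left _ (List.mem_append_right _ ?_))
      rw [if_pos (Or.inl h0)]; simp
    have heB : ((i + 1, j), (i + 1, j + 1)) ∉ get_boundary_edges_alt rp grid := by
      refine pvNotMemB rp grid (by simpa [pvG1] using hv) ?_
        ⟨(i, j), pvMemDedup rp hcm, by simp [pvEdges, pvQuads]⟩
      have harith : ((i + 1 - 1 : Int), j) = (i, j) := by rw [Prod.mk.injEq]; omega
      simpa [pvG2, harith] using hcm
    rw [hEq] at heA
    exact heB heA
  · -- (i,j) and (i,j+1) in the region with column j+1 = 0: A keeps their shared edge (left shortcut)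
    have heA : ((i, j + 1), (i + 1, j + 1)) ∈ get_boundary_edges rp grid := by
      refine pvMemA rp grid hv ?_
      refine List.mem_append_left _ (List.mem_append_right _ ?_)
      rw [if_pos (Or.inl (by omega : (j + 1 : Int) = 0))]; simp
    have heB : ((i, j + 1), (i + 1, j + 1)) ∉ get_boundary_edges_alt rp grid := by
      refine pvNotMemB rp grid (by simpa [pvG1] using hv) ?_
        ⟨(i, j + 1), pvMemDedup rp hv, by simp [pvEdges, pvQuads]⟩
      have hne : ¬ ((i + 1 : Int) = i) := by omega
      have harith : ((i : Int), j + 1 - 1) = (i, j) := by rw [Prod.mk.injEq]; omega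
      simpa [pvG2, hne, harith] using hcm
    rw [hEq] at heA
    exact heB heA
  · -- (i,j) and (i,j+1) in the region with j = m-1: A keeps their shared edge (right shortcut)
    rw [pvHead] at h0
    have heA : ((i, j + 1), (i + 1, j + 1)) ∈ get_boundary_edges rp grid := by
      refine pvMemA rp grid hcm ?_
      refine List.mem_append_right _ ?_
      rw [if_pos (Or.inl h0)]; simp
    have heB : ((i, j + 1), (i + 1, j + 1)) ∉ get_boundary_edges_alt rp grid := by
      refine pvNotMemB rp grid (by simpa [pvG1] using hv) ?_
        ⟨(i, j), pvMemDedup rp hcm, by simp [pvEdges, pvQuads]⟩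
      have hne : ¬ ((i + 1 : Int) = i) := by omega
      have harith : ((i : Int), j + 1 - 1) = (i, j) := by rw [Prod.mk.injEq]; omega
      simpa [pvG2, hne, harith] using hcm
    rw [hEq] at heA
    exact heB heA
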